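-- pv_equiv track=rewrite | github.com/theMarcHuerta/xgcd_hw | alg/fib_gen.py | largest_fibonacci_numbers
-- ===== SOURCE A (Python) =====
-- def largest_fibonacci_numbers(n_bits):
--     """Find the two largest Fibonacci numbers that fit in an n-bit unsigned integer."""
--     max_value = 2**n_bits - 1
--
--     # Start Fibonacci sequence
--     fib_numbers = [0, 1]
--
--     while True:
--         next_fib = fib_numbers[-1] + fib_numbers[-2]
--         if next_fib > max_value:
--             break
--         fib_numbers.append(next_fib)
--
--     # The last two valid Fibonacci numbers
--     largest_fib = fib_numbers[-1]
--     second_largest_fib = fib_numbers[-2]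
--
--     return hex(second_largest_fib), hex(largest_fib)
-- ===== SOURCE B (Python) =====
-- def largest_fibonacci_numbers(n_bits):
--     """Find the two largest Fibonacci numbers that fit in an n-bit unsigned integer.
--
--     Fast-doubling fib(k) plus a binary search for the largest index m >= 1 with
--     fib(m) <= 2**n_bits - 1 (m is clamped at 1, matching the seed pair 0, 1)."""
--     max_value = 2**n_bits - 1
--
--     def fib_pair(k):
--         # (fib(k), fib(k+1)) by fast doubling
--         if k == 0:
--             return (0, 1)
--         a, b = fib_pair(k >> 1)
--         c = a * (2 * b - a)          # fib(2j)
--         d = a * a + b * b            # fib(2j+1)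
--         if k & 1:
--             return (d, c + d)
--         return (c, d)
--
--     # fib(2k+4) >= 2**(k+1) > max_value, so this is a valid upper bound
--     lo, hi = 1, max(2 * n_bits + 4, 1)
--     while lo + 1 < hi:
--         mid = (lo + hi) // 2
--         if fib_pair(mid)[0] <= max_value:
--             lo = mid
--         else:
--             hi = mid
--     second, largest = fib_pair(lo - 1)
--     return hex(second), hex(largest)
-- ===== Notes on version B (the rewrite author's own statement) =====
-- stated objective: faster
-- what changed: Replaces A's one-by-one Fibonacci accumulation loop (appending every Fibonacci number up to 2^n-1) by fast-doubling computation of fib(k) combined with a binary search for the largest index whose Fibonacci value fits in n bits.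
import Mathlib
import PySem

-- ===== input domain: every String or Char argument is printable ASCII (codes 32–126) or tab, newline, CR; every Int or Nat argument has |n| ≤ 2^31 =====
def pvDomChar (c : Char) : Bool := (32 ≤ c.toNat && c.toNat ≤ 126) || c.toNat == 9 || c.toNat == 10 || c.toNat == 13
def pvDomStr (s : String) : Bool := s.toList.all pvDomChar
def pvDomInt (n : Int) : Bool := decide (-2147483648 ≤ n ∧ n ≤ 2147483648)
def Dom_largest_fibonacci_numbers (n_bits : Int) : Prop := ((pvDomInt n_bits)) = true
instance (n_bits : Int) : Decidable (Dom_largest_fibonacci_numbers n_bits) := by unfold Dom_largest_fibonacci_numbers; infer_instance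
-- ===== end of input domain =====

-- B replaces A's one-by-one Fibonacci loop by fast-doubling fib(k) plus a binary search
-- for the largest index whose Fibonacci value fits; objective: faster (asymptotic).

-- ===== PORT A =====

-- termination measures of the loops below (cited by name from decreasing_by)
theorem pvHalveDec {n : Nat} (h : ¬ n = 0) : n / 16 < n := Nat.div_lt_self (Nat.pos_of_ne_zero h) (by decide)
theorem pvHalve2Dec {n : Nat} (h : ¬ n = 0) : n / 2 < n := Nat.div_lt_self (Nat.pos_of_ne_zero h) (by decide)

-- hex(x) for 0 ≤ x (every value hex() is applied to here is a Fibonacci number): "0x" + lowercase digits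
def pvHexDigit (n : Nat) : Char := (['0','1','2','3','4','5','6','7','8','9','a','b','c','d','e','f']).getD n '0'

def pvHexAux (n : Nat) (acc : List Char) : List Char :=
  if h : n = 0 then acc else pvHexAux (n / 16) (pvHexDigit (n % 16) :: acc)
  termination_by n
  decreasing_by exact pvHalveDec h

def pvHex (x : Int) : String :=
  if x = 0 then "0x0" else String.ofList ('0' :: 'x' :: pvHexAux x.toNat [])

-- max_value = 2**n_bits - 1.  For n_bits < 0 Python's value is the float 2.0**n_bits - 1 ∈ (-1, 0);
-- every comparison the programs make is against an integer Fibonacci value, for which that float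
-- compares exactly like -1, so -1 models it exactly.
def pvMaxVal (n : Int) : Int := if 0 ≤ n then 2 ^ n.toNat - 1 else -1

-- A's while-loop: state = last two list entries (a, b); appends while a + b ≤ max_value.
-- fuel is only a totality guard: the sum a + b grows by at least 1 per iteration, so
-- fuel = (max_value + 1).toNat never runs out and the loop behaves exactly like A's.
def pvALoop (fuel : Nat) (maxv a b : Int) : Int × Int :=
  match fuel with
  | 0 => (a, b)
  | fuel + 1 => if a + b ≤ maxv then pvALoop fuel maxv b (a + b) else (a, b)

def largest_fibonacci_numbers (n_bits : Int) : String × String :=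
  let maxv := pvMaxVal n_bits
  let p := pvALoop ((maxv + 1).toNat) maxv 0 1
  (pvHex p.1, pvHex p.2)

-- ===== PORT B =====

-- (fib(k), fib(k+1)) by fast doubling; k >> 1 = k / 2, k & 1 = k % 2
def pvFibPair (k : Nat) : Int × Int :=
  if h : k = 0 then (0, 1)
  else
    let p := pvFibPair (k / 2)
    let a := p.1
    let b := p.2
    let c := a * (2 * b - a)
    let d := a * a + b * b
    if k % 2 = 1 then (d, c + d) else (c, d)
  termination_by k
  decreasing_by exact pvHalve2Dec h

-- B's while-loop: binary search keeping fib(lo) ≤ max_value < fib(hi) (lo clamped at 1).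
-- fuel is only a totality guard: hi - lo halves per iteration, so fuel = hi never runs out.
def pvBSearch (fuel : Nat) (maxv : Int) (lo hi : Nat) : Nat :=
  match fuel with
  | 0 => lo
  | fuel + 1 =>
    if lo + 1 < hi then
      let mid := (lo + hi) / 2
      if (pvFibPair mid).1 ≤ maxv then pvBSearch fuel maxv mid hi else pvBSearch fuel maxv lo mid
    else lo

def largest_fibonacci_numbers_alt (n_bits : Int) : String × String :=
  let maxv := pvMaxVal n_bits
  let hi := (max (2 * n_bits + 4) 1).toNat
  let lo := pvBSearch hi maxv 1 hi
  let p := pvFibPair (lo - 1)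
  (pvHex p.1, pvHex p.2)

-- ===== PRECONDITION & SPEC =====
def Spec_largest_fibonacci_numbers (n_bits : Int) (out : String × String) : Prop := out = largest_fibonacci_numbers_alt n_bits
instance (n_bits : Int) (out : String × String) : Decidable (Spec_largest_fibonacci_numbers n_bits out) := by unfold Spec_largest_fibonacci_numbers; infer_instance

-- ===== CLAIM (what is proved, stated in full; the proofs are below) =====
def Claim_equal_largest_fibonacci_numbers : Prop := ∀ (n_bits : Int), Dom_largest_fibonacci_numbers n_bits → Spec_largest_fibonacci_numbers n_bits (largest_fibonacci_numbers n_bits)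

-- ===== LEMMAS AND PROOFS =====

theorem pvFibPair_eq (k : Nat) : pvFibPair k = ((Nat.fib k : Int), (Nat.fib (k + 1) : Int)) := by
  rw [pvFibPair]
  by_cases h : k = 0
  · simp [h]
  · have ih := pvFibPair_eq (k / 2)
    set m := k / 2 with hm2
    have hle : Nat.fib m ≤ 2 * Nat.fib (m + 1) := by
      have := Nat.fib_le_fib_succ (n := m); omega
    have hfe : (Nat.fib (2 * m) : Int) = (Nat.fib m : Int) * (2 * (Nat.fib (m + 1) : Int) - (Nat.fib m : Int)) := by
      have h2 := Nat.fib_two_mul m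
      zify [hle] at h2
      rw [h2]
    have hfo : (Nat.fib (2 * m + 1) : Int) = (Nat.fib m : Int) * (Nat.fib m : Int) + (Nat.fib (m + 1) : Int) * (Nat.fib (m + 1) : Int) := by
      have h2 := Nat.fib_two_mul_add_one m
      zify at h2
      rw [h2]; ring
    rcases Nat.even_or_odd k with he | ho
    · obtain ⟨j, hj⟩ := he
      have hk : k = 2 * m := by omega
      have hmod : ¬ (k % 2 = 1) := by omega
      simp only [dif_neg h, ih, if_neg hmod, Prod.mk.injEq]
      refine ⟨?_, ?_⟩
      · rw [hk, hfe]
      · rw [show k + 1 = 2 * m + 1 by omega, hfo]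
    · obtain ⟨j, hj⟩ := ho
      have hk : k = 2 * m + 1 := by omega
      have hmod : k % 2 = 1 := by omega
      simp only [dif_neg h, ih, if_pos hmod, Prod.mk.injEq]
      refine ⟨?_, ?_⟩
      · rw [hk, hfo]
      · rw [show k + 1 = 2 * m + 1 + 1 by omega, Nat.fib_add_two]
        push_cast
        rw [hfe, hfo]
  termination_by k
  decreasing_by exact Nat.div_lt_self (Nat.pos_of_ne_zero h) (by norm_num)

theorem pvALoop_spec (fuel : Nat) (maxv a b : Int) (k : Nat)
    (hak : a = (Nat.fib k : Int)) (hbk : b = (Nat.fib (k + 1) : Int))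
    (hfuel : (maxv + 1 - (a + b)).toNat < fuel) :
    ∃ M, pvALoop fuel maxv a b = ((Nat.fib M : Int), (Nat.fib (M + 1) : Int)) ∧
      (M = k ∨ (Nat.fib (M + 1) : Int) ≤ maxv) ∧ maxv < (Nat.fib (M + 2) : Int) := by
  induction fuel generalizing a b k with
  | zero => omega
  | succ fuel ih =>
    have hb : 1 ≤ b := by
      rw [hbk]; exact_mod_cast Nat.fib_pos.mpr (by omega)
    have hsum : a + b = (Nat.fib (k + 2) : Int) := by
      rw [hak, hbk, Nat.fib_add_two]; push_cast; ring
    rw [pvALoop]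
    by_cases h : a + b ≤ maxv
    · obtain ⟨M, hM1, hM2, hM3⟩ := ih b (a + b) (k + 1) hbk (by rw [hsum]) (by omega)
      refine ⟨M, ?_, ?_, hM3⟩
      · simpa only [if_pos h] using hM1
      · rcases hM2 with rfl | hle
        · right; rw [show k + 1 + 1 = k + 2 from rfl, ← hsum]; exact h
        · right; exact hle
    · refine ⟨k, ?_, Or.inl rfl, by omega⟩
      rw [if_neg h, hak, hbk]

theorem pvBSearch_spec (fuel : Nat) (maxv : Int) (lo hi : Nat) (hlo : 1 ≤ lo) (hlh : lo < hi)
    (hfl : lo = 1 ∨ (Nat.fib lo : Int) ≤ maxv) (hfh : maxv < (Nat.fib hi : Int))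
    (hfuel : hi - lo ≤ fuel) :
    1 ≤ pvBSearch fuel maxv lo hi ∧
      (pvBSearch fuel maxv lo hi = 1 ∨ (Nat.fib (pvBSearch fuel maxv lo hi) : Int) ≤ maxv) ∧
      maxv < (Nat.fib (pvBSearch fuel maxv lo hi + 1) : Int) := by
  induction fuel generalizing lo hi with
  | zero => omega
  | succ fuel ih =>
    rw [pvBSearch]
    by_cases h : lo + 1 < hi
    · simp only [if_pos h]
      by_cases hc : (pvFibPair ((lo + hi) / 2)).1 ≤ maxv
      · simp only [if_pos hc]
        have hcf : (Nat.fib ((lo + hi) / 2) : Int) ≤ maxv := by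
          rw [pvFibPair_eq] at hc; exact hc
        exact ih ((lo + hi) / 2) hi (by omega) (by omega) (Or.inr hcf) hfh (by omega)
      · simp only [if_neg hc]
        have hcf : maxv < (Nat.fib ((lo + hi) / 2) : Int) := by
          rw [pvFibPair_eq] at hc; omega
        exact ih lo ((lo + hi) / 2) hlo (by omega) hfl hcf (by omega)
    · simp only [if_neg h]
      have hhi : hi = lo + 1 := by omega
      exact ⟨hlo, hfl, hhi ▸ hfh⟩

theorem pvM_unique_aux (maxv : Int) (m1 m2 : Nat) (hlt : m1 < m2)
    (h1b : maxv < (Nat.fib (m1 + 2) : Int))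
    (h2a : m2 = 0 ∨ (Nat.fib (m2 + 1) : Int) ≤ maxv) : False := by
  rcases h2a with rfl | hle
  · omega
  · have h := Nat.fib_mono (show m1 + 2 ≤ m2 + 1 by omega)
    have : (Nat.fib (m1 + 2) : Int) ≤ (Nat.fib (m2 + 1) : Int) := by exact_mod_cast h
    omega

theorem pvM_unique (maxv : Int) (m1 m2 : Nat)
    (h1a : m1 = 0 ∨ (Nat.fib (m1 + 1) : Int) ≤ maxv) (h1b : maxv < (Nat.fib (m1 + 2) : Int))
    (h2a : m2 = 0 ∨ (Nat.fib (m2 + 1) : Int) ≤ maxv) (h2b : maxv < (Nat.fib (m2 + 2) : Int)) :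
    m1 = m2 := by
  rcases lt_trichotomy m1 m2 with h | h | h
  · exact absurd (pvM_unique_aux maxv m1 m2 h h1b h2a) not_false
  · exact h
  · exact absurd (pvM_unique_aux maxv m2 m1 h h2b h1a) not_false

theorem pv_pow_le_fib (t : Nat) : 2 ^ t ≤ Nat.fib (2 * t + 4) := by
  induction t with
  | zero => decide
  | succ n ih =>
    have h1 : Nat.fib (2 * n + 4) ≤ Nat.fib (2 * n + 5) := Nat.fib_le_fib_succ
    have h2 : Nat.fib (2 * n + 6) = Nat.fib (2 * n + 4) + Nat.fib (2 * n + 5) := Nat.fib_add_two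
    have h3 : 2 * (n + 1) + 4 = 2 * n + 6 := by omega
    rw [h3, h2, pow_succ]
    omega

-- ===== VERDICT (by name: the statement is the Claim_ definition above) =====
theorem largest_fibonacci_numbers_spec : Claim_equal_largest_fibonacci_numbers := by
  intro n_bits _
  unfold Spec_largest_fibonacci_numbers largest_fibonacci_numbers largest_fibonacci_numbers_alt
  dsimp only
  by_cases hn : 0 ≤ n_bits
  · -- nonnegative bit width
    have hmax0 : 0 ≤ pvMaxVal n_bits := by
      have h2 : (1:Int) ≤ 2 ^ n_bits.toNat := one_le_pow₀ (by norm_num)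
      simp only [pvMaxVal, if_pos hn]; omega
    obtain ⟨MA, hA1, hA2, hA3⟩ := pvALoop_spec ((pvMaxVal n_bits + 1).toNat) (pvMaxVal n_bits) 0 1 0
      (by norm_num) (by norm_num) (by omega)
    obtain ⟨t, rfl⟩ : ∃ t : Nat, n_bits = (t : Int) := ⟨n_bits.toNat, (Int.toNat_of_nonneg hn).symm⟩
    have hhi : (max (2 * (t : Int) + 4) 1).toNat = 2 * t + 4 := by
      rw [max_eq_left (by omega)]; omega
    have hfh : pvMaxVal (t : Int) < (Nat.fib ((max (2 * (t : Int) + 4) 1).toNat) : Int) := by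
      rw [hhi]
      have h1 := pv_pow_le_fib t
      have h2 : ((2:Int) ^ t) ≤ (Nat.fib (2 * t + 4) : Int) := by exact_mod_cast h1
      have hmax : pvMaxVal (t : Int) = 2 ^ t - 1 := by simp [pvMaxVal]
      omega
    obtain ⟨hB0, hB1, hB2⟩ := pvBSearch_spec ((max (2 * (t : Int) + 4) 1).toNat) (pvMaxVal (t : Int)) 1
      ((max (2 * (t : Int) + 4) 1).toNat) (le_refl 1) (by omega) (Or.inl rfl) hfh (by omega)
    set r := pvBSearch ((max (2 * (t : Int) + 4) 1).toNat) (pvMaxVal (t : Int)) 1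
      ((max (2 * (t : Int) + 4) 1).toNat) with hr
    have hMeq : MA = r - 1 := by
      apply pvM_unique (pvMaxVal (t : Int)) <;>
        first
          | exact hA2
          | exact hA3
          | (rcases hB1 with h | h
             · left; omega
             · right; rw [show r - 1 + 1 = r by omega]; exact h)
          | (rw [show r - 1 + 2 = r + 1 by omega]; exact hB2)
    rw [hA1, pvFibPair_eq, hMeq]
  · -- negative bit width: max_value < 0, both sides return the seed pair (0, 1)
    have hmax : pvMaxVal n_bits = -1 := by simp [pvMaxVal, hn]
    have hA : pvALoop ((pvMaxVal n_bits + 1).toNat) (pvMaxVal n_bits) 0 1 = (0, 1) := by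
      have h0 : (pvMaxVal n_bits + 1).toNat = 0 := by omega
      rw [h0, pvALoop]
    have hhi2 : (max (2 * n_bits + 4) 1).toNat ≤ 2 := by
      rcases max_cases (2 * n_bits + 4) 1 with ⟨he, hc⟩ | ⟨he, hc⟩ <;> omega
    have hB : pvBSearch ((max (2 * n_bits + 4) 1).toNat) (pvMaxVal n_bits) 1 ((max (2 * n_bits + 4) 1).toNat) = 1 := by
      have h1 : 1 ≤ (max (2 * n_bits + 4) 1).toNat := by
        rcases max_cases (2 * n_bits + 4) 1 with ⟨he, hc⟩ | ⟨he, hc⟩ <;> omega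
      interval_cases h : (max (2 * n_bits + 4) 1).toNat <;> simp [pvBSearch]
    have hF : pvFibPair 0 = (0, 1) := by rw [pvFibPair]; simp
    rw [hA, hB, hF]
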